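-- pv_equiv track=rewrite | github.com/teddyoweh/fathom | api.py | _get_upsell_card_index
-- ===== SOURCE A (Python) =====
-- def _get_upsell_card_index(included_list):
--     a, z = 0, 0
--     for index, item in enumerate(included_list):
--         if 'template' in item:
--             a = index
--             break
--     for index, item in enumerate(included_list[::-1]):
--         if 'template' in item:
--             z = len(included_list) - index
--             break
--     return a, z
-- ===== SOURCE B (Python) =====
-- def _get_upsell_card_index(included_list):
--     first, last, found = 0, 0, False
--     for index, item in enumerate(included_list):
--         if 'template' in item:
--             last = index + 1
--             if not found:
--                 first = index
--                 found = True
--     return first, last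
-- ===== Notes on version B (the rewrite author's own statement) =====
-- stated objective: simpler
-- what changed: Replaces A's two scans (a forward break-scan plus a second break-scan over a reversed copy of the list) with one forward pass that maintains both the first match index and the running last match index.
import Mathlib
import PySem

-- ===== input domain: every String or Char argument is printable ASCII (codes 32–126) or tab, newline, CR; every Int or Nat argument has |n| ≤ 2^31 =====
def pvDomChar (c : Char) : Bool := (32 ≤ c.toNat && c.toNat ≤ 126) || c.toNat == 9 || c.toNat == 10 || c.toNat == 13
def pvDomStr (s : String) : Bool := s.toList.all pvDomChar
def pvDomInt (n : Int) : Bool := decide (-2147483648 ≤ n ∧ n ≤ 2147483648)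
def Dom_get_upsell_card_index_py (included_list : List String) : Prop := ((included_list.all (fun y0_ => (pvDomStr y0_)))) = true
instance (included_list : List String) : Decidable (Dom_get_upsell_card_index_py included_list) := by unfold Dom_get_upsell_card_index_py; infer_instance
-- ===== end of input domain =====

-- B replaces A's two break-scans (the second over a reversed copy) with one forward pass
-- maintaining both the first and the running last match index; same return value, simpler.

-- 'template' in item (shared primitive)
def pvHasTemplate (x : String) : Bool := PySem.Str.isIn "template" x

-- ===== PORT A =====
-- first loop: 'for index, item in enumerate(...): if 'template' in item: a = index; break'
def pvFindFirst (xs : List String) (i : Int) : Int :=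
  match xs with
  | [] => 0
  | x :: rest => if pvHasTemplate x then i else pvFindFirst rest (i + 1)

-- second loop over included_list[::-1]: 'z = len(included_list) - index; break'
def pvFindLastRev (n : Int) (xs : List String) (j : Int) : Int :=
  match xs with
  | [] => 0
  | x :: rest => if pvHasTemplate x then n - j else pvFindLastRev n rest (j + 1)

def get_upsell_card_index_py (included_list : List String) : Int × Int :=
  (pvFindFirst included_list 0,
   pvFindLastRev (included_list.length : Int) included_list.reverse 0)

-- ===== PORT B =====
-- the single loop of Source B, state (first, last, found), index counter i
def pvAltGo (xs : List String) (i first last : Int) (found : Bool) : Int × Int × Bool :=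
  match xs with
  | [] => (first, last, found)
  | x :: rest =>
    if pvHasTemplate x then
      pvAltGo rest (i + 1) (if found then first else i) (i + 1) true
    else
      pvAltGo rest (i + 1) first last found

def get_upsell_card_index_py_alt (included_list : List String) : Int × Int :=
  let s := pvAltGo included_list 0 0 0 false
  (s.1, s.2.1)

-- ===== PRECONDITION & SPEC =====
def Spec_get_upsell_card_index_py (included_list : List String) (out : Int × Int) : Prop := out = get_upsell_card_index_py_alt included_list
instance (included_list : List String) (out : Int × Int) : Decidable (Spec_get_upsell_card_index_py included_list out) := by unfold Spec_get_upsell_card_index_py; infer_instance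

-- ===== CLAIM (what is proved, stated in full; the proofs are below) =====
def Claim_equal_get_upsell_card_index_py : Prop := ∀ (included_list : List String), Dom_get_upsell_card_index_py included_list → Spec_get_upsell_card_index_py included_list (get_upsell_card_index_py included_list)

-- ===== LEMMAS AND PROOFS =====

lemma pvFindFirst_of_not_any (xs : List String) (i : Int)
    (h : xs.any pvHasTemplate = false) : pvFindFirst xs i = 0 := by
  induction xs generalizing i with
  | nil => simp [pvFindFirst]
  | cons y ys ih =>
    simp only [List.any_cons, Bool.or_eq_false_iff] at h
    simp [pvFindFirst, h.1, ih _ h.2]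

lemma pvFindFirst_snoc (xs : List String) (x : String) (i : Int) :
    pvFindFirst (xs ++ [x]) i =
      if xs.any pvHasTemplate then pvFindFirst xs i
      else if pvHasTemplate x then i + xs.length else 0 := by
  induction xs generalizing i with
  | nil => simp [pvFindFirst]
  | cons y ys ih =>
    simp only [List.cons_append, pvFindFirst, List.any_cons, List.length_cons]
    cases hy : pvHasTemplate y
    · simp only [Bool.false_or, Bool.false_eq_true, if_false, ih]
      split_ifs <;> push_cast <;> ring
    · simp

lemma pvFindLastRev_shift (ys : List String) (n j : Int) :
    pvFindLastRev n ys j = pvFindLastRev (n - j) ys 0 := by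
  induction ys generalizing n j with
  | nil => simp [pvFindLastRev]
  | cons y ys ih =>
    simp only [pvFindLastRev]
    cases hy : pvHasTemplate y
    · simp only [Bool.false_eq_true, if_false]
      rw [ih n (j + 1), ih (n - j) (0 + 1)]
      ring_nf
    · simp only [if_true, sub_zero]

lemma pvAltGo_snoc (xs : List String) (x : String) (i f l : Int) (b : Bool) :
    pvAltGo (xs ++ [x]) i f l b =
      (fun s : Int × Int × Bool =>
        if pvHasTemplate x then
          ((if s.2.2 then s.1 else i + xs.length), i + xs.length + 1, true)
        else s) (pvAltGo xs i f l b) := by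
  induction xs generalizing i f l b with
  | nil => simp [pvAltGo]
  | cons y ys ih =>
    simp only [List.cons_append, pvAltGo, List.length_cons]
    cases hy : pvHasTemplate y
    · simp only [Bool.false_eq_true, if_false, ih]
      split_ifs <;> simp [Prod.ext_iff] <;> push_cast <;> omega
    · simp only [if_true, ih]
      split_ifs <;> simp [Prod.ext_iff] <;> omega

lemma pvAltGo_eq_scans (xs : List String) :
    pvAltGo xs 0 0 0 false =
      (pvFindFirst xs 0,
       pvFindLastRev (xs.length : Int) xs.reverse 0,
       xs.any pvHasTemplate) := by
  induction xs using List.reverseRecOn with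
  | nil => simp [pvAltGo, pvFindFirst, pvFindLastRev]
  | append_singleton ys x ih =>
    rw [pvAltGo_snoc, ih, pvFindFirst_snoc]
    simp only [List.reverse_append, List.reverse_singleton, List.singleton_append,
      pvFindLastRev, List.length_append, List.length_singleton, List.any_append,
      List.any_cons, List.any_nil]
    cases hx : pvHasTemplate x
    · simp only [Bool.false_eq_true, if_false, Bool.or_false]
      rw [pvFindLastRev_shift _ _ (0 + 1)]
      have hlen : ((ys.length + 1 : Nat) : Int) - (0 + 1) = (ys.length : Int) := by
        push_cast; ring
      rw [hlen]
      cases hb : ys.any pvHasTemplate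
      · simp [pvFindFirst_of_not_any ys 0 hb]
      · simp
    · simp only [if_true]
      cases hb : ys.any pvHasTemplate
      · simp only [Bool.false_eq_true, if_false]
        refine Prod.ext ?_ (Prod.ext ?_ rfl) <;> push_cast <;> ring_nf
      · simp only [if_true]
        refine Prod.ext rfl (Prod.ext ?_ rfl)
        push_cast; ring_nf

-- ===== VERDICT (by name: the statement is the Claim_ definition above) =====
theorem get_upsell_card_index_py_spec : Claim_equal_get_upsell_card_index_py := by
  intro xs _
  unfold Spec_get_upsell_card_index_py get_upsell_card_index_py get_upsell_card_index_py_alt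
  rw [pvAltGo_eq_scans]
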